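-- pv_equiv track=rewrite | github.com/gamamoe/ace-the-coding-interviews | Seungwoon/extra/scd1.py | solution
-- ===== SOURCE A (Python) =====
-- from itertools import combinations
--
-- def solution(A):
--     B = list(map(str, A)) # 우선 슬라이싱위해 str로 바꾼걸 B로 두고
--     sol = [num[0] + num[-1] for num in B] # 각 원소의 양 끝만 남기고 가운데 모두 삭제한걸 sol
--     dict = {}  # dict 정의
--     for i, value in enumerate(sol):  # sol에 대해 index(i)와 value로 나열
--         if value in dict: # sol의 value값이 dict에 key로 있으면
--             dict[value].append(i)  # 해당 value(key)값에 i 인덱스 값 추가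
--         else: # sol의 value값이 dict에 key로 없으면
--             dict[value] = [i]  # 그대로 value(key)와 인덱스(i) 값 추가
--
-- # 이렇게 만들어진 dict는 {sol의 value값 : 해당 index} 구성입니다.
--
--     index = {key: indices for key, indices in dict.items() if len(indices) > 1}
-- # 인덱스 리스트 길이가 최소 2개 이상인 것만 추출(1개만 있는건 삭제)
--
--     if len(sol) == len(set(sol)):  # 양 끝이 같은게 없으면 바로 -1로 종료
--         return -1
--
--     stick = list(index.values())  # 값만 추출
--     compare = []  # 후보 리스트 비교 대상
--     for k in stick:
--         if len(k) == 2:  # 양 끝 같은 숫자가 딱 2개뿐이면 2개만 더함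
--             compare.append(A[k[0]] + A[k[1]])
--         elif len(k) >= 3:  # 3개 이상이면 3개중 2개를 뽑아서 더한 것 중 max만 추출
--             index_combi = list(combinations(k, 2))
--             max_sum = max(A[i] + A[j] for i, j in index_combi)
--             compare.append(max_sum)
--
--     return max(compare)  # 비교 리스트 중 최댓값 추출
-- ===== SOURCE B (Python) =====
-- def solution(A):
--     # One pass: per key (first+last digit char of str(x)) keep the two largest values.
--     best = {}
--     for x in A:
--         s = str(x)
--         k = s[0] + s[-1]
--         if k in best:
--             m1, m2 = best[k]
--             if m2 is None or x > m2:
--                 best[k] = (x, m1) if x > m1 else (m1, x)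
--         else:
--             best[k] = (x, None)
--     ans = None
--     for m1, m2 in best.values():
--         if m2 is not None:
--             c = m1 + m2
--             if ans is None or c > ans:
--                 ans = c
--     return -1 if ans is None else ans
-- ===== Notes on version B (the rewrite author's own statement) =====
-- stated objective: faster
-- what changed: A groups indices per first+last-digit key, then for keys with >=3 members scans all index pairs via itertools.combinations for the best sum; B makes one pass keeping only the two largest values per key and one pass over the dict for the best pair sum, so the quadratic per-key pair scan disappears.
import Mathlib
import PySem

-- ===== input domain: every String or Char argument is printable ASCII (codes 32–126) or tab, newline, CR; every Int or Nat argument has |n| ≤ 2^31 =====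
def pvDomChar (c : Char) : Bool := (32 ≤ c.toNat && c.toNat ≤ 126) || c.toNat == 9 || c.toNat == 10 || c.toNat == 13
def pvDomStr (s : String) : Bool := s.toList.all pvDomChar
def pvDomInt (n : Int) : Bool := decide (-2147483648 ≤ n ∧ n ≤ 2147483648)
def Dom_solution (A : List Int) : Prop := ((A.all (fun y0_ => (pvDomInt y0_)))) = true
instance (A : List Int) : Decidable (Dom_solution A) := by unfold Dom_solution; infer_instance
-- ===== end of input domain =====

-- B replaces A's index-grouping dict + per-key itertools.combinations scan (quadratic per key)
-- by a single pass keeping only the two largest values per key; objective: faster (O(n^2) → O(n)).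

-- ===== PORT A =====
-- A-side helpers: the two loop bodies of A, named so the proofs can speak about them (same code).
def pvAStep (d : PySem.Dict (List Char) (List Int)) (p : Int × List Char) :
    PySem.Dict (List Char) (List Int) :=
  match d.get? p.2 with
  | some l => d.insert p.2 (l ++ [p.1])
  | none => d.insert p.2 [p.1]

def pvACmpStep (A : List Int) (acc : List Int) (k : List Int) : List Int :=
  if k.length = 2 then
    acc ++ [PySem.List.pyGetD A ((PySem.List.pyGet? k 0).getD 0) 0 +
            PySem.List.pyGetD A ((PySem.List.pyGet? k 1).getD 0) 0]
  else if 3 ≤ k.length then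
    let index_combi := PySem.List.combinations k 2
    let max_sum := (PySem.List.max? (index_combi.map (fun c =>
        PySem.List.pyGetD A ((PySem.List.pyGet? c 0).getD 0) 0 +
        PySem.List.pyGetD A ((PySem.List.pyGet? c 1).getD 0) 0)) (fun x => x)).getD 0
    acc ++ [max_sum]
  else acc

def solution (A : List Int) : Int :=
  let B := A.map PySem.Int.toStr
  let sol := B.map (fun num => [(PySem.Str.pyGet? num 0).getD ' ', (PySem.Str.pyGet? num (-1)).getD ' '])
  let dict := (PySem.List.enumerate sol).foldl pvAStep PySem.Dict.empty
  let index := dict.items.filter (fun kv => decide (1 < kv.2.length))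
  if sol.length = (PySem.Set.ofList sol).length then -1
  else
    let stick := index.map (fun kv => kv.2)
    let compare := stick.foldl (pvACmpStep A) []
    (PySem.List.max? compare (fun x => x)).getD 0

-- ===== PORT B =====
-- B-side helpers: the loop bodies of Source B (same code).
def pvBStep (d : PySem.Dict (List Char) (Int × Option Int)) (x : Int) :
    PySem.Dict (List Char) (Int × Option Int) :=
  let s := PySem.Int.toStr x
  let k := [(PySem.Str.pyGet? s 0).getD ' ', (PySem.Str.pyGet? s (-1)).getD ' ']
  match d.get? k with
  | some pr =>
      match pr.2 with
      | none => if pr.1 < x then d.insert k (x, some pr.1) else d.insert k (pr.1, some x)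
      | some m2 => if m2 < x then
            (if pr.1 < x then d.insert k (x, some pr.1) else d.insert k (pr.1, some x))
          else d
  | none => d.insert k (x, none)

def pvBAnsStep (acc : Option Int) (p : Int × Option Int) : Option Int :=
  match p.2 with
  | some m2 =>
    match acc with
    | none => some (p.1 + m2)
    | some a => if a < p.1 + m2 then some (p.1 + m2) else some a
  | none => acc

def solution_alt (A : List Int) : Int :=
  let best := A.foldl pvBStep PySem.Dict.empty
  match best.values.foldl pvBAnsStep none with
  | none => -1
  | some a => a

-- ===== PRECONDITION & SPEC =====
def Spec_solution (A : List Int) (out : Int) : Prop := out = solution_alt A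
instance (A : List Int) (out : Int) : Decidable (Spec_solution A out) := by unfold Spec_solution; infer_instance

-- ===== CLAIM (what is proved, stated in full; the proofs are below) =====
def Claim_equal_solution : Prop := ∀ (A : List Int), Dom_solution A → Spec_solution A (solution A)

-- ===== LEMMAS AND PROOFS =====

-- the key 'str(x)[0] + str(x)[-1]' both programs group by
def pvKey (x : Int) : List Char :=
  [(PySem.Str.pyGet? (PySem.Int.toStr x) 0).getD ' ', (PySem.Str.pyGet? (PySem.Int.toStr x) (-1)).getD ' ']

-- the values of A sharing key k, in order
def pvG (A : List Int) (k : List Char) : List Int := A.filter (fun x => pvKey x == k)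

-- B's two-largest update step, on bare pairs
def pvStep2 (pr : Int × Option Int) (x : Int) : Int × Option Int :=
  match pr.2 with
  | none => if pr.1 < x then (x, some pr.1) else (pr.1, some x)
  | some m2 => if m2 < x then (if pr.1 < x then (x, some pr.1) else (pr.1, some x)) else pr

def pvTop2 (g : List Int) : Option (Int × Option Int) :=
  match g with
  | [] => none
  | v :: vs => some (vs.foldl pvStep2 (v, none))

-- the per-key candidate both programs agree on (sum of the two largest values of the group)
def pvCand (A : List Int) (k : List Char) : Int :=
  match pvTop2 (pvG A k) with
  | some (t1, some t2) => t1 + t2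
  | _ => 0

def pvKeys (A : List Int) : List (List Char) := PySem.Set.ofList (A.map pvKey)

def pvCands (A : List Int) : List Int :=
  ((pvKeys A).filter (fun k => decide (1 < (pvG A k).length))).map (pvCand A)

-- invariant of B's two-largest accumulator over the processed group g
def Top2Inv (g : List Int) (pr : Int × Option Int) : Prop :=
  match pr.2 with
  | none => [pr.1].Perm g
  | some t2 => ∃ rest, (pr.1 :: t2 :: rest).Perm g ∧ t2 ≤ pr.1 ∧ ∀ y ∈ rest, y ≤ t2

def pvPairSum (c : List Int) : Int := (PySem.List.pyGet? c 0).getD 0 + (PySem.List.pyGet? c 1).getD 0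

lemma pvSol_eq (A : List Int) :
    (A.map PySem.Int.toStr).map (fun num => [(PySem.Str.pyGet? num 0).getD ' ', (PySem.Str.pyGet? num (-1)).getD ' ']) = A.map pvKey := by
  simp only [List.map_map]
  apply List.map_congr_left
  intro a _
  simp [pvKey, Function.comp]

lemma pvAStep_insert_form : pvAStep = fun (d : PySem.Dict (List Char) (List Int)) (p : Int × List Char) =>
    d.insert p.2 ((fun (d : PySem.Dict (List Char) (List Int)) (p : Int × List Char) =>
      match d.get? p.2 with | some t => t ++ [p.1] | none => [p.1]) d p) := by
  funext d p
  simp only [pvAStep]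
  cases h : d.get? p.2 <;> simp [h]

lemma pvBStep_get? (d : PySem.Dict (List Char) (Int × Option Int)) (x : Int) (k : List Char) :
    (pvBStep d x).get? k =
      if pvKey x = k then
        (match d.get? (pvKey x) with
         | some pr => some (pvStep2 pr x)
         | none => some (x, none))
      else d.get? k := by
  show (match d.get? (pvKey x) with
        | some pr =>
          match pr.2 with
          | none => if pr.1 < x then d.insert (pvKey x) (x, some pr.1) else d.insert (pvKey x) (pr.1, some x)
          | some m2 => if m2 < x then
                (if pr.1 < x then d.insert (pvKey x) (x, some pr.1) else d.insert (pvKey x) (pr.1, some x))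
              else d
        | none => d.insert (pvKey x) (x, none)).get? k = _
  by_cases hk : pvKey x = k
  · subst hk
    cases hd : d.get? (pvKey x) with
    | none => simp [hd, PySem.Dict.get?_insert_self]
    | some pr =>
      obtain ⟨m1, o⟩ := pr
      cases o with
      | none =>
        by_cases h1 : m1 < x <;> simp [hd, h1, PySem.Dict.get?_insert_self, pvStep2]
      | some m2 =>
        by_cases h2 : m2 < x
        · by_cases h1 : m1 < x <;> simp [hd, h1, h2, PySem.Dict.get?_insert_self, pvStep2]
        · simp [hd, h2, pvStep2]
  · cases hd : d.get? (pvKey x) with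
    | none => simp [hk, PySem.Dict.get?_insert_of_ne d _ (fun h => hk h.symm)]
    | some pr =>
      obtain ⟨m1, o⟩ := pr
      have hne : k ≠ pvKey x := fun h => hk h.symm
      cases o with
      | none => by_cases h1 : m1 < x <;> simp [hk, h1, PySem.Dict.get?_insert_of_ne d _ hne]
      | some m2 =>
        by_cases h2 : m2 < x
        · by_cases h1 : m1 < x <;> simp [hk, h1, h2, PySem.Dict.get?_insert_of_ne d _ hne]
        · simp [hk, h2]

lemma pvBStep_keys (d : PySem.Dict (List Char) (Int × Option Int)) (x : Int) :
    (pvBStep d x).keys = PySem.Set.add d.keys (pvKey x) := by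
  show (match d.get? (pvKey x) with
        | some pr =>
          match pr.2 with
          | none => if pr.1 < x then d.insert (pvKey x) (x, some pr.1) else d.insert (pvKey x) (pr.1, some x)
          | some m2 => if m2 < x then
                (if pr.1 < x then d.insert (pvKey x) (x, some pr.1) else d.insert (pvKey x) (pr.1, some x))
              else d
        | none => d.insert (pvKey x) (x, none)).keys = _
  cases hd : d.get? (pvKey x) with
  | none =>
    have hc : d.contains (pvKey x) = false := by
      rw [PySem.Dict.contains_eq_isSome_get?, hd]; rfl
    have hm : pvKey x ∉ d.keys := fun h =>
      by simp [(PySem.Dict.contains_iff_mem_keys d _).mpr h] at hc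
    rw [PySem.Dict.keys_insert_of_not_contains d _ hc, PySem.Set.add_of_not_mem hm]
  | some pr =>
    have hc : d.contains (pvKey x) = true := by
      rw [PySem.Dict.contains_eq_isSome_get?, hd]; rfl
    have hm : pvKey x ∈ d.keys := (PySem.Dict.contains_iff_mem_keys d _).mp hc
    have hins : ∀ v : Int × Option Int, (d.insert (pvKey x) v).keys = PySem.Set.add d.keys (pvKey x) := by
      intro v
      rw [PySem.Dict.keys_insert_of_contains d _ hc, PySem.Set.add_of_mem hm]
    obtain ⟨m1, o⟩ := pr
    cases o with
    | none => by_cases h1 : m1 < x <;> simp [h1, hins]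
    | some m2 =>
      by_cases h2 : m2 < x
      · by_cases h1 : m1 < x <;> simp [h1, h2, hins]
      · simp [h2, PySem.Set.add_of_mem hm]

lemma pvPairSum_pair (a b : Int) : pvPairSum [a, b] = a + b := rfl


lemma pvEnumerate_map {α β : Type} (f : α → β) (l : List α) (n : Int) :
    PySem.List.enumerate (l.map f) n = (PySem.List.enumerate l n).map (fun p => (p.1, f p.2)) := by
  induction l generalizing n with
  | nil => rfl
  | cons x xs ih => simp [PySem.List.enumerate_cons, ih]

lemma pvAStep_modify : pvAStep = fun d p => d.modify p.2 [] (fun l => l ++ [p.1]) := by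
  funext d p
  simp only [pvAStep, PySem.Dict.modify, PySem.Dict.getD_eq_get?_getD]
  cases h : d.get? p.2 <;> simp [h]

lemma pvDictA_getD (l : List (Int × List Char)) (d : PySem.Dict (List Char) (List Int)) (k : List Char) :
    (l.foldl pvAStep d).getD k [] = d.getD k [] ++ (l.filter (fun p => p.2 == k)).map (fun p => p.1) := by
  rw [pvAStep_modify]
  have h1 : l.foldl (fun d p => d.modify p.2 [] (fun t => t ++ [p.1])) d
      = (l.map Prod.swap).foldl (fun d p => d.modify p.1 [] (fun t => t ++ [p.2])) d := by
    rw [List.foldl_map]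
    rfl
  rw [h1, PySem.Dict.getD_foldl_modify_append]
  simp [List.filter_map, List.map_map]
  rfl

lemma pvDictA_keys (l : List (Int × List Char)) (d : PySem.Dict (List Char) (List Int)) :
    (l.foldl pvAStep d).keys = PySem.Set.update d.keys (l.map (fun p => p.2)) := by
  rw [pvAStep_insert_form]
  exact PySem.Dict.keys_foldl_insert_key l (fun p => p.2) _ d

lemma pvDictA_keys_nodup (l : List (Int × List Char)) (d : PySem.Dict (List Char) (List Int))
    (h : d.keys.Nodup) : (l.foldl pvAStep d).keys.Nodup := by
  rw [pvAStep_insert_form]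
  exact PySem.Dict.nodup_keys_foldl_insert_key l (fun p => p.2) _ d h

set_option maxRecDepth 4096 in
lemma pvEnumGet (A0 : List Int) (k : List Char) :
    ∀ (l : List Int) (n : Nat), (∀ j (hj : j < l.length), PySem.List.pyGetD A0 ((n : Int) + j) 0 = l[j]) →
    ((PySem.List.enumerate l (n : Int)).filter (fun p => pvKey p.2 == k)).map (fun p => PySem.List.pyGetD A0 p.1 0)
      = l.filter (fun x => pvKey x == k) := by
  intro l
  induction l with
  | nil => intro n _; rfl
  | cons x xs ih =>
    intro n h
    have hx : PySem.List.pyGetD A0 (n : Int) 0 = x := by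
      have := h 0 (by simp)
      simpa using this
    have hih := ih (n + 1) (fun j hj => by
      have := h (j + 1) (by simpa using Nat.succ_lt_succ hj)
      have harg : ((n : Int) + (j + 1 : Nat)) = (((n + 1 : Nat) : Int) + j) := by push_cast; ring
      rw [harg] at this
      simpa using this)
    rw [PySem.List.enumerate_cons]
    have hc : ((n : Int) + 1) = (((n+1 : Nat)) : Int) := by push_cast; ring
    rw [hc, List.filter_cons, List.filter_cons]
    by_cases hk : (pvKey x == k) = true
    · rw [if_pos hk, if_pos hk, List.map_cons, hih, hx]
    · rw [if_neg hk, if_neg hk, hih]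

def pvIdxs (A : List Int) (k : List Char) : List Int :=
  ((PySem.List.enumerate (A.map pvKey) 0).filter (fun p => p.2 == k)).map (fun p => p.1)

-- A's per-key index list, mapped through A-indexing, is the value group
lemma pvIdxs_spec (A : List Int) (k : List Char) :
    (pvIdxs A k).map (fun i => PySem.List.pyGetD A i 0) = pvG A k := by
  rw [pvIdxs, pvEnumerate_map, List.filter_map, List.map_map, List.map_map, pvG]
  exact pvEnumGet A k A 0 (fun j hj => by
    simp [PySem.List.pyGetD_natCast, List.getD_eq_getElem, hj])

lemma pvFoldB_get? (l : List Int) (d : PySem.Dict (List Char) (Int × Option Int)) (k : List Char) :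
    (l.foldl pvBStep d).get? k =
      match d.get? k with
      | some pr => some ((l.filter (fun x => pvKey x == k)).foldl pvStep2 pr)
      | none => pvTop2 (l.filter (fun x => pvKey x == k)) := by
  induction l generalizing d with
  | nil => cases hd : d.get? k <;> simp [hd, pvTop2]
  | cons x xs ih =>
    rw [List.foldl_cons, ih, List.filter_cons]
    by_cases hk : pvKey x = k
    · have hkb : (pvKey x == k) = true := by simp [hk]
      rw [if_pos hkb, pvBStep_get?, if_pos hk, hk]
      cases hd : d.get? k with
      | none => simp [pvTop2]
      | some pr => simp
    · have hkb : ¬ ((pvKey x == k) = true) := by simp [hk]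
      rw [if_neg hkb, pvBStep_get?, if_neg hk]

lemma pvFoldB_keys (l : List Int) (d : PySem.Dict (List Char) (Int × Option Int)) :
    (l.foldl pvBStep d).keys = PySem.Set.update d.keys (l.map pvKey) := by
  induction l generalizing d with
  | nil => rfl
  | cons x xs ih =>
    rw [List.foldl_cons, ih, List.map_cons, PySem.Set.update_cons, pvBStep_keys]

lemma pvAnsFold (ps : List (Int × Option Int)) (acc : Option Int) :
    ps.foldl pvBAnsStep acc =
      (ps.filterMap (fun p => p.2.map (fun m2 => p.1 + m2))).foldl
        (fun a c => match a with | none => some c | some m => if m < c then some c else some m) acc := by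
  induction ps generalizing acc with
  | nil => rfl
  | cons p ps ih =>
    obtain ⟨m1, o⟩ := p
    cases o with
    | none => simp [pvBAnsStep, ih]
    | some m2 => cases acc <;> simp [pvBAnsStep, ih]

lemma pvMaxFold (cs : List Int) :
    cs.foldl (fun a c => match a with | none => some c | some m => if m < c then some c else some m)
      (none : Option Int) = PySem.List.max? cs (fun x => x) := by
  unfold PySem.List.max?
  congr 1
  funext a c
  cases a <;> simp

lemma pvTop2Inv_perm {g g' : List Int} {pr : Int × Option Int} (h : Top2Inv g pr) (hp : g.Perm g') :
    Top2Inv g' pr := by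
  obtain ⟨t1, o⟩ := pr
  cases o with
  | none => exact h.trans hp
  | some t2 =>
    obtain ⟨rest, h1, h2, h3⟩ := h
    exact ⟨rest, h1.trans hp, h2, h3⟩

lemma pvTop2Inv_step {g : List Int} {pr : Int × Option Int} (h : Top2Inv g pr) (x : Int) :
    Top2Inv (x :: g) (pvStep2 pr x) := by
  obtain ⟨t1, o⟩ := pr
  cases o with
  | none =>
    simp only [Top2Inv, pvStep2] at h ⊢
    by_cases h1 : t1 < x
    · rw [if_pos h1]
      exact ⟨[], by simpa using h.cons x, le_of_lt h1, by simp⟩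
    · rw [if_neg h1]
      exact ⟨[], (List.Perm.swap x t1 []).trans (h.cons x), le_of_not_gt h1, by simp⟩
  | some t2 =>
    obtain ⟨rest, hp, hle, hb⟩ := h
    simp only [Top2Inv, pvStep2]
    by_cases h2 : t2 < x
    · rw [if_pos h2]
      by_cases h1 : t1 < x
      · rw [if_pos h1]
        exact ⟨t2 :: rest, (hp.cons x), le_of_lt h1,
          fun y hy => by rcases List.mem_cons.mp hy with rfl | hy
                         · exact hle
                         · exact (hb y hy).trans hle⟩
      · rw [if_neg h1]
        exact ⟨t2 :: rest, (List.Perm.swap x t1 _).trans (hp.cons x), le_of_not_gt h1,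
          fun y hy => by rcases List.mem_cons.mp hy with rfl | hy
                         · exact le_of_lt h2
                         · exact (hb y hy).trans (le_of_lt h2)⟩
    · rw [if_neg h2]
      refine ⟨x :: rest, ?_, hle,
        fun y hy => by rcases List.mem_cons.mp hy with rfl | hy
                       · exact le_of_not_gt h2
                       · exact hb y hy⟩
      show ([t1, t2] ++ x :: rest).Perm (x :: g)
      exact List.perm_middle.trans ((hp.cons x).trans (List.Perm.refl _)) |>.trans (List.Perm.refl _)

lemma pvTop2Inv_fold : ∀ (l g : List Int) (pr : Int × Option Int), Top2Inv g pr →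
    Top2Inv (g ++ l) (l.foldl pvStep2 pr) := by
  intro l
  induction l with
  | nil => intro g pr h; simpa using h
  | cons x xs ih =>
    intro g pr h
    rw [List.foldl_cons]
    have := ih (x :: g) (pvStep2 pr x) (pvTop2Inv_step h x)
    exact pvTop2Inv_perm this List.perm_middle.symm

lemma pvTop2_spec (g : List Int) (h : g ≠ []) : ∃ pr, pvTop2 g = some pr ∧ Top2Inv g pr := by
  cases g with
  | nil => exact absurd rfl h
  | cons v vs =>
    refine ⟨vs.foldl pvStep2 (v, none), rfl, ?_⟩
    have : Top2Inv [v] (v, none) := by simp [Top2Inv]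
    simpa using pvTop2Inv_fold vs [v] (v, none) this

lemma pvTop2Inv_none_len {g : List Int} {t1 : Int} (h : Top2Inv g (t1, none)) : g.length = 1 := by
  simp only [Top2Inv] at h
  simpa using h.length_eq.symm

lemma pvTop2Inv_some_len {g : List Int} {t1 t2 : Int} (h : Top2Inv g (t1, some t2)) : 2 ≤ g.length := by
  obtain ⟨rest, hp, -, -⟩ := h
  dsimp only at hp
  have := hp.length_eq
  simp at this
  omega

lemma pvPairBound {g : List Int} {t1 t2 : Int} (h : Top2Inv g (t1, some t2))
    {c : List Int} (hc : c ∈ PySem.List.combinations g 2) : pvPairSum c ≤ t1 + t2 := by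
  obtain ⟨hsub, hlen⟩ := (PySem.List.mem_combinations_iff g 2 c).mp hc
  obtain ⟨a, b, rfl⟩ := List.length_eq_two.mp hlen
  obtain ⟨rest, hp, hle, hb⟩ := h
  dsimp only at hp hle
  rw [pvPairSum_pair]
  have hat : a ≤ t1 := by
    have ha : a ∈ t1 :: t2 :: rest := hp.mem_iff.mpr (hsub.subset (by simp))
    rcases List.mem_cons.mp ha with rfl | ha
    · exact le_refl _
    · rcases List.mem_cons.mp ha with rfl | ha
      · exact hle
      · exact ((hb a ha).trans hle)
  have hbt : b ≤ t1 := by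
    have hb' : b ∈ t1 :: t2 :: rest := hp.mem_iff.mpr (hsub.subset (by simp))
    rcases List.mem_cons.mp hb' with rfl | hb'
    · exact le_refl _
    · rcases List.mem_cons.mp hb' with rfl | hb'
      · exact hle
      · exact ((hb b hb').trans hle)
  have hcount : List.countP (fun y => decide (t2 < y)) [a, b] ≤
      List.countP (fun y => decide (t2 < y)) (t1 :: t2 :: rest) :=
    (hsub.countP_le).trans_eq ((hp.countP_eq (fun y => decide (t2 < y)))).symm
  have hrest : List.countP (fun y => decide (t2 < y)) rest = 0 :=
    List.countP_eq_zero.mpr (fun y hy => by simpa using not_lt.mpr (hb y hy))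
  have htarget : List.countP (fun y => decide (t2 < y)) (t1 :: t2 :: rest) ≤ 1 := by
    simp only [List.countP_cons, hrest]
    by_cases hh : t2 < t1 <;> simp [hh]
  by_cases h2a : t2 < a
  · by_cases h2b : t2 < b
    · exfalso
      have : List.countP (fun y => decide (t2 < y)) [a, b] = 2 := by
        simp [List.countP_cons, h2a, h2b]
      omega
    · omega
  · omega

lemma pvPairRealize {g : List Int} {t1 t2 : Int} (h : Top2Inv g (t1, some t2)) :
    ∃ c ∈ PySem.List.combinations g 2, pvPairSum c = t1 + t2 := by
  obtain ⟨rest, hp, -, -⟩ := h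
  dsimp only at hp
  have hsub : List.Subperm [t1, t2] g := by
    have h1 : List.Sublist [t1, t2] (t1 :: t2 :: rest) :=
      ((List.nil_sublist rest).cons₂ t2).cons₂ t1
    exact h1.subperm.trans hp.subperm
  obtain ⟨l', hl', hsubl⟩ := hsub
  have hlen : l'.length = 2 := by simpa using hl'.length_eq
  obtain ⟨a, b, rfl⟩ := List.length_eq_two.mp hlen
  refine ⟨[a, b], (PySem.List.mem_combinations_iff g 2 _).mpr ⟨hsubl, rfl⟩, ?_⟩
  have := hl'.sum_eq
  simp at this
  rw [pvPairSum_pair]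
  omega

lemma pvMaxPair {g : List Int} {t1 t2 : Int} (h : Top2Inv g (t1, some t2)) :
    PySem.List.max? ((PySem.List.combinations g 2).map pvPairSum) (fun x => x) = some (t1 + t2) := by
  obtain ⟨c, hc, hcs⟩ := pvPairRealize h
  have hmem : (t1 + t2) ∈ (PySem.List.combinations g 2).map pvPairSum :=
    List.mem_map.mpr ⟨c, hc, hcs⟩
  cases hm : PySem.List.max? ((PySem.List.combinations g 2).map pvPairSum) (fun x => x) with
  | none =>
    have := (PySem.List.max?_eq_none_iff _ _).mp hm
    rw [this] at hmem
    simp at hmem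
  | some m =>
    have hmm := PySem.List.max?_mem hm
    obtain ⟨c', hc', rfl⟩ := List.mem_map.mp hmm
    have h1 : pvPairSum c' ≤ t1 + t2 := pvPairBound h hc'
    have h2 : t1 + t2 ≤ pvPairSum c' := PySem.List.max?_isMax hm _ hmem
    exact congrArg some (le_antisymm h1 h2)

lemma pvOfList_sublist {α : Type} [BEq α] [LawfulBEq α] (l : List α) :
    (PySem.Set.ofList l : List α).Sublist l := by
  induction l with
  | nil => simp [PySem.Set.ofList_nil]
  | cons x xs ih =>
    rw [PySem.Set.ofList_cons]
    exact ((List.filter_sublist).trans ih).cons₂ x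

lemma pvLenEq_iff_nodup {α : Type} [BEq α] [LawfulBEq α] (l : List α) :
    l.length = (PySem.Set.ofList l : List α).length ↔ l.Nodup := by
  constructor
  · intro h
    have heq : (PySem.Set.ofList l : List α) = l := (pvOfList_sublist l).eq_of_length h.symm
    have := PySem.Set.nodup_ofList l
    rwa [heq] at this
  · intro h
    rw [PySem.Set.ofList_eq_self_of_nodup l h]

lemma pvMapFilter {α β : Type} (l : List α) (p : α → Bool) (f : α → β) :
    (l.filter p).map f = l.filterMap (fun x => if p x then some (f x) else none) := by
  induction l with
  | nil => rfl
  | cons x xs ih => by_cases h : p x <;> simp [h, ih]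

lemma pvG_len_count (A : List Int) (k : List Char) :
    (pvG A k).length = (A.map pvKey).count k := by
  rw [pvG, List.count_eq_countP, List.countP_map, ← List.countP_eq_length_filter]
  rfl

-- A's per-key compare value, named
def pvAVal (A : List Int) (ks : List Int) : Int :=
  if ks.length = 2 then
    PySem.List.pyGetD A ((PySem.List.pyGet? ks 0).getD 0) 0 +
    PySem.List.pyGetD A ((PySem.List.pyGet? ks 1).getD 0) 0
  else
    (PySem.List.max? ((PySem.List.combinations ks 2).map (fun c =>
        PySem.List.pyGetD A ((PySem.List.pyGet? c 0).getD 0) 0 +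
        PySem.List.pyGetD A ((PySem.List.pyGet? c 1).getD 0) 0)) (fun x => x)).getD 0

lemma pvACmpStep_val (A : List Int) (acc : List Int) (ks : List Int) (h : 2 ≤ ks.length) :
    pvACmpStep A acc ks = acc ++ [pvAVal A ks] := by
  by_cases h2 : ks.length = 2
  · simp [pvACmpStep, pvAVal, h2]
  · have h3 : 3 ≤ ks.length := by omega
    simp [pvACmpStep, pvAVal, h2, h3]

lemma pvCmpFold (A : List Int) :
    ∀ (l : List (List Int)) (init : List Int), (∀ ks ∈ l, 2 ≤ ks.length) →
    l.foldl (pvACmpStep A) init = init ++ l.map (pvAVal A) := by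
  intro l
  induction l with
  | nil => intro init _; simp
  | cons ks l ih =>
    intro init h
    rw [List.foldl_cons, pvACmpStep_val A init ks (h ks (by simp)),
      ih _ (fun t ht => h t (by simp [ht]))]
    simp

lemma pvAVal_eq (A : List Int) (k : List Char) (h : 1 < (pvG A k).length) :
    pvAVal A (pvIdxs A k) = pvCand A k := by
  have hmap : (pvIdxs A k).map (fun i => PySem.List.pyGetD A i 0) = pvG A k := pvIdxs_spec A k
  have hlen : (pvIdxs A k).length = (pvG A k).length := by rw [← hmap]; simp
  obtain ⟨pr, htop, hinv⟩ := pvTop2_spec (pvG A k)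
    (fun hnil => by rw [hnil] at h; simp at h)
  obtain ⟨t1, o⟩ := pr
  cases o with
  | none => have := pvTop2Inv_none_len hinv; omega
  | some t2 =>
    rw [pvCand, htop]
    by_cases h2 : (pvIdxs A k).length = 2
    · obtain ⟨i, j, hij⟩ := List.length_eq_two.mp h2
      have hg : pvG A k = [PySem.List.pyGetD A i 0, PySem.List.pyGetD A j 0] := by
        rw [← hmap, hij]; rfl
      rw [pvAVal, if_pos h2, hij]
      have hmx := pvMaxPair hinv
      rw [hg] at hmx
      have hcomb : PySem.List.combinations [PySem.List.pyGetD A i 0, PySem.List.pyGetD A j 0] 2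
          = [[PySem.List.pyGetD A i 0, PySem.List.pyGetD A j 0]] := by
        exact PySem.List.combinations_length_self _
      rw [hcomb] at hmx
      have : PySem.List.pyGetD A i 0 + PySem.List.pyGetD A j 0 = t1 + t2 := by
        have hx : PySem.List.max? [pvPairSum [PySem.List.pyGetD A i 0, PySem.List.pyGetD A j 0]]
            (fun x => x) = some (pvPairSum [PySem.List.pyGetD A i 0, PySem.List.pyGetD A j 0]) := rfl
        rw [List.map_singleton] at hmx
        rw [hx] at hmx
        rw [pvPairSum_pair] at hmx
        exact Option.some.inj hmx
      show _ = t1 + t2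
      rw [← this]
      rfl
    · rw [pvAVal, if_neg h2]
      have hlist : ((PySem.List.combinations (pvIdxs A k) 2).map (fun c =>
          PySem.List.pyGetD A ((PySem.List.pyGet? c 0).getD 0) 0 +
          PySem.List.pyGetD A ((PySem.List.pyGet? c 1).getD 0) 0))
          = (PySem.List.combinations (pvG A k) 2).map pvPairSum := by
        rw [← hmap, PySem.List.combinations_map, List.map_map]
        apply List.map_congr_left
        intro c hc
        obtain ⟨-, hc2⟩ := (PySem.List.mem_combinations_iff _ _ _).mp hc
        obtain ⟨i, j, rfl⟩ := List.length_eq_two.mp hc2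
        rfl
      rw [hlist, pvMaxPair hinv]
      rfl

lemma pvKeys_mem_ne_nil (A : List Int) (k : List Char) (hk : k ∈ pvKeys A) : pvG A k ≠ [] := by
  have : k ∈ A.map pvKey := (PySem.Set.mem_ofList _ _).mp hk
  obtain ⟨x, hx, rfl⟩ := List.mem_map.mp this
  have : x ∈ pvG A (pvKey x) := List.mem_filter.mpr ⟨hx, by simp⟩
  exact List.ne_nil_of_mem this

lemma pvCs_eq (A : List Int) :
    (pvKeys A).filterMap (fun k =>
        (((pvTop2 (pvG A k)).getD (0, none)).2).map
          (fun m2 => ((pvTop2 (pvG A k)).getD (0, none)).1 + m2)) = pvCands A := by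
  rw [pvCands, pvMapFilter]
  apply List.filterMap_congr
  intro k hk
  obtain ⟨pr, htop, hinv⟩ := pvTop2_spec (pvG A k) (pvKeys_mem_ne_nil A k hk)
  obtain ⟨t1, o⟩ := pr
  cases o with
  | none =>
    have hl := pvTop2Inv_none_len hinv
    have : ¬ (1 < (pvG A k).length) := by omega
    simp [htop, this]
  | some t2 =>
    have hl := pvTop2Inv_some_len hinv
    have hlt : 1 < (pvG A k).length := by omega
    simp [htop, hlt, pvCand]

lemma pvCands_nil_iff (A : List Int) : pvCands A = [] ↔ (A.map pvKey).Nodup := by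
  rw [pvCands, List.map_eq_nil_iff, List.filter_eq_nil_iff]
  constructor
  · intro h
    rw [List.nodup_iff_count_le_one]
    intro k
    by_cases hk : k ∈ A.map pvKey
    · have := h k ((PySem.Set.mem_ofList _ _).mpr hk)
      rw [← pvG_len_count]
      simpa using this
    · simp [List.count_eq_zero.mpr hk]
  · intro h k hk
    have := (List.nodup_iff_count_le_one.mp h) k
    rw [← pvG_len_count] at this
    simpa using this

lemma pvA_eq (A : List Int) :
    solution A = if (A.map pvKey).Nodup then -1 else (PySem.List.max? (pvCands A) (fun x => x)).getD 0 := by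
  simp only [solution]
  rw [pvSol_eq]
  have hnodup0 : (PySem.Dict.empty : PySem.Dict (List Char) (List Int)).keys.Nodup := by
    rw [PySem.Dict.keys_empty]; exact List.nodup_nil
  have hkeys : ((PySem.List.enumerate (A.map pvKey) 0).foldl pvAStep PySem.Dict.empty).keys
      = pvKeys A := by
    rw [pvDictA_keys, PySem.Dict.keys_empty, PySem.List.map_snd_enumerate]
    exact PySem.Set.update_empty _
  have hnodup := pvDictA_keys_nodup (PySem.List.enumerate (A.map pvKey) 0) PySem.Dict.empty hnodup0
  have hitems : ((PySem.List.enumerate (A.map pvKey) 0).foldl pvAStep PySem.Dict.empty).items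
      = (pvKeys A).map (fun k => (k, pvIdxs A k)) := by
    rw [PySem.Dict.items_eq_map_keys _ hnodup [], hkeys]
    apply List.map_congr_left
    intro k _
    have : ((PySem.List.enumerate (A.map pvKey) 0).foldl pvAStep PySem.Dict.empty).getD k []
        = pvIdxs A k := by
      rw [pvDictA_getD]
      have he : (PySem.Dict.empty : PySem.Dict (List Char) (List Int)).getD k [] = [] := by
        rw [PySem.Dict.getD_eq_get?_getD, PySem.Dict.get?_empty]
        rfl
      rw [he, List.nil_append, pvIdxs]
    rw [this]
  rw [hitems]
  by_cases hnd : (A.map pvKey).Nodup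
  · rw [if_pos ((pvLenEq_iff_nodup _).mpr hnd), if_pos hnd]
  · rw [if_neg (fun hc => hnd ((pvLenEq_iff_nodup _).mp hc)), if_neg hnd]
    rw [List.filter_map, List.map_map]
    have hflt : ((pvKeys A).filter
          ((fun kv : List Char × List Int => decide (1 < kv.2.length)) ∘ (fun k => (k, pvIdxs A k))))
        = (pvKeys A).filter (fun k => decide (1 < (pvG A k).length)) := by
      apply List.filter_congr
      intro k _
      have hl : (pvIdxs A k).length = (pvG A k).length := by
        rw [← pvIdxs_spec A k]; simp
      simp [Function.comp, hl]
    rw [hflt]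
    have hall : ∀ ks ∈ ((pvKeys A).filter (fun k => decide (1 < (pvG A k).length))).map
        ((fun kv : List Char × List Int => kv.2) ∘ (fun k => (k, pvIdxs A k))), 2 ≤ ks.length := by
      intro ks hks
      obtain ⟨k, hk, rfl⟩ := List.mem_map.mp hks
      have := List.of_mem_filter hk
      have hgt : 1 < (pvG A k).length := by simpa using this
      have hl : (pvIdxs A k).length = (pvG A k).length := by
        rw [← pvIdxs_spec A k]; simp
      show 2 ≤ (pvIdxs A k).length
      omega
    rw [pvCmpFold A _ [] hall, List.nil_append, List.map_map]
    congr 1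
    rw [pvCands]
    congr 1
    apply List.map_congr_left
    intro k hk
    have hgt : 1 < (pvG A k).length := by simpa using List.of_mem_filter hk
    exact pvAVal_eq A k hgt

lemma pvB_eq (A : List Int) :
    solution_alt A = match PySem.List.max? (pvCands A) (fun x => x) with | none => -1 | some a => a := by
  simp only [solution_alt]
  have hget : ∀ k, (A.foldl pvBStep PySem.Dict.empty).get? k = pvTop2 (pvG A k) := by
    intro k
    rw [pvFoldB_get?]
    have : (PySem.Dict.empty : PySem.Dict (List Char) (Int × Option Int)).get? k = none :=
      PySem.Dict.get?_empty k
    rw [this]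
    rfl
  have hkeys : (A.foldl pvBStep PySem.Dict.empty).keys = pvKeys A := by
    rw [pvFoldB_keys]
    have : (PySem.Dict.empty : PySem.Dict (List Char) (Int × Option Int)).keys = [] :=
      PySem.Dict.keys_empty
    rw [this]
    exact PySem.Set.update_empty _
  have hnodup : (A.foldl pvBStep PySem.Dict.empty).keys.Nodup := by
    rw [hkeys]; exact PySem.Set.nodup_ofList _
  have hvals : (A.foldl pvBStep PySem.Dict.empty).values
      = (pvKeys A).map (fun k => (pvTop2 (pvG A k)).getD (0, none)) := by
    rw [PySem.Dict.values_eq_map_keys _ hnodup (0, none), hkeys]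
    apply List.map_congr_left
    intro k _
    rw [PySem.Dict.getD_eq_get?_getD, hget]
  rw [hvals, pvAnsFold, pvMaxFold, List.filterMap_map]
  have : ((pvKeys A).filterMap ((fun p : Int × Option Int =>
        p.2.map (fun m2 => p.1 + m2)) ∘ (fun k => (pvTop2 (pvG A k)).getD (0, none))))
      = pvCands A := pvCs_eq A
  rw [this]

-- ===== VERDICT (by name: the statement is the Claim_ definition above) =====
theorem solution_spec : Claim_equal_solution := by
  intro A _
  unfold Spec_solution
  rw [pvA_eq, pvB_eq]
  by_cases h : (A.map pvKey).Nodup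
  · have : pvCands A = [] := (pvCands_nil_iff A).mpr h
    simp [h, this, PySem.List.max?]
  · have hne : pvCands A ≠ [] := fun hc => h ((pvCands_nil_iff A).mp hc)
    cases hm : PySem.List.max? (pvCands A) (fun x => x) with
    | none => exact absurd ((PySem.List.max?_eq_none_iff _ _).mp hm) hne
    | some m => simp [h, hm]
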